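-- pv_equiv track=rewrite | github.com/beavishead/ML_sandbox | bfs_deque_implementation_01.py | bfs
-- ===== SOURCE A (Python) =====
-- from collections import deque
--
-- def bfs(fld, vsd,start_x,start_y,n,m):
--     queue = deque([(start_x-1,start_y-1,0)])
--     vsd[start_x-1][start_y-1] = True
--     #create grid of moves
--     dx = [-2, -2, -1, 1, 2, 2, 1, -1]
--     dy = [-1, 1, 2, 2, 1, -1, -2, -2]
--     sum_of_paths = 0
--
--     while queue:
--         #unpack the first queue element
--         x,y,depth = queue.popleft()
--         vsd[x][y]=True
--
--         #make all the potential moves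
--         for (loc1,loc2) in zip(dx,dy):
--             nx,ny = x+loc1, y+loc2
--             # check if the points is within the margins
--             if (0<= nx < n) and (0<=ny< m) and not vsd[nx][ny]:
--                 vsd[nx][ny] = True
--                 if fld[nx][ny]=='#':
--                     sum_of_paths += depth + 1
--                     fld[nx][ny] = '*'
--                     queue.append((nx, ny, depth + 1))
--                 else:
--                     queue.append((nx,ny, depth+1))
--     fld[start_x-1][start_y-1] = '*'
--     for rows in fld:
--         if '#' in rows:
--             return -1
--     return sum_of_paths
-- ===== SOURCE B (Python) =====
-- # Level-synchronous BFS: whole frontiers with one level counter instead of a deque of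
-- # depth-tagged nodes.  Mutates fld and vsd exactly like the original (visited marks,
-- # '#'->'*' rewrites, start cell '*'); return-value equivalent.
-- def bfs(fld, vsd, start_x, start_y, n, m):
--     moves = [(-2, -1), (-2, 1), (-1, 2), (1, 2), (2, 1), (2, -1), (1, -2), (-1, -2)]
--     vsd[start_x - 1][start_y - 1] = True
--     frontier = [(start_x - 1, start_y - 1)]
--     level = 0
--     sum_of_paths = 0
--     while frontier:
--         nxt = []
--         for x, y in frontier:
--             for ddx, ddy in moves:
--                 nx, ny = x + ddx, y + ddy
--                 if 0 <= nx < n and 0 <= ny < m and not vsd[nx][ny]: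
--                     vsd[nx][ny] = True
--                     if fld[nx][ny] == '#':
--                         sum_of_paths += level + 1
--                         fld[nx][ny] = '*'
--                     nxt.append((nx, ny))
--         frontier = nxt
--         level += 1
--     fld[start_x - 1][start_y - 1] = '*'
--     return sum_of_paths if all('#' not in row for row in fld) else -1
-- ===== Notes on version B (the rewrite author's own statement) =====
-- stated objective: alternative
-- what changed: Replaces A's FIFO deque of depth-tagged nodes by a level-synchronous BFS that expands whole frontiers with a single level counter and checks leftover '#' with all(); same visit order within each level, so the same sum.
import Mathlib
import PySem

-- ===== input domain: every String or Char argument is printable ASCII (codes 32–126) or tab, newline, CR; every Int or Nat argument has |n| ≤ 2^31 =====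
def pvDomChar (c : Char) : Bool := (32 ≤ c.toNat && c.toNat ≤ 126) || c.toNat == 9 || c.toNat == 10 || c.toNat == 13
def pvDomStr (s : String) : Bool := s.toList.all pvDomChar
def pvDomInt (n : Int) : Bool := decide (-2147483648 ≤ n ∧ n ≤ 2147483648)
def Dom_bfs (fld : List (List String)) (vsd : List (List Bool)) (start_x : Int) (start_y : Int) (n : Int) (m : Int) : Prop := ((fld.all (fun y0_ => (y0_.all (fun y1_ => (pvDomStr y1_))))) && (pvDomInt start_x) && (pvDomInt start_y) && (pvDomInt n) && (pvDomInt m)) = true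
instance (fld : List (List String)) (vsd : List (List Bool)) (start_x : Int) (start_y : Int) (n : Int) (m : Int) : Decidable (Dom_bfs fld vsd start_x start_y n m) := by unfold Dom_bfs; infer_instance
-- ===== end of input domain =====

-- B replaces A's deque of depth-tagged nodes by a level-synchronous BFS over whole frontiers
-- with a single level counter (objective: alternative decomposition, same cost).
-- Both Pythons mutate fld/vsd identically; the equivalence proved here is about the return value.

-- ===== PORT A =====
-- Shared 2D-indexing primitives (exact Python g[i][j] read / write via PySem.List.pyGet?/pySet?;
-- the write is a no-op exactly where Python raises IndexError — such inputs are outside Pre_bfs).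
def cellGet {α : Type} (g : List (List α)) (i j : Int) : Option α :=
  (PySem.List.pyGet? g i).bind fun row => PySem.List.pyGet? row j

def cellSet {α : Type} (g : List (List α)) (i j : Int) (v : α) : List (List α) :=
  ((PySem.List.pyGet? g i).bind (fun row => PySem.List.pySet? row j v)).elim g
    (fun row' => PySem.List.pySetD g i row')

-- termination measure support: number of unvisited cells (cited by the ports' decreasing_by)
def falseCount (v : List (List Bool)) : Nat := (v.map (fun r => r.countP (fun b => !b))).sum

def muSt {γ : Type} (st : List (List String) × List (List Bool) × Int × List γ) : Nat :=
  st.2.2.2.length + falseCount st.2.1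

lemma countP_set_true_le (r : List Bool) (k : Nat) :
    (r.set k true).countP (fun b => !b) ≤ r.countP (fun b => !b) := by
  induction r generalizing k with
  | nil => simp
  | cons b t ih =>
    cases k with
    | zero => cases b <;> simp [List.countP_cons]
    | succ k => cases b <;> simpa [List.countP_cons] using ih k

lemma countP_set_true_lt (r : List Bool) (k : Nat) (h : r[k]? = some false) :
    (r.set k true).countP (fun b => !b) < r.countP (fun b => !b) := by
  induction r generalizing k with
  | nil => simp at h
  | cons b t ih =>
    cases k with
    | zero => simp_all [List.countP_cons]
    | succ k =>
      simp only [List.getElem?_cons_succ] at h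
      cases b <;> simpa [List.countP_cons] using ih k h

lemma falseCount_set_le (v : List (List Bool)) (k : Nat) (row r' : List Bool)
    (hv : v[k]? = some row)
    (h : r'.countP (fun b => !b) ≤ row.countP (fun b => !b)) :
    falseCount (v.set k r') ≤ falseCount v := by
  induction v generalizing k with
  | nil => simp at hv
  | cons a t ih =>
    cases k with
    | zero => simp_all [falseCount]
    | succ k =>
      simp only [List.getElem?_cons_succ] at hv
      have := ih k hv
      simp_all [falseCount]

lemma falseCount_set_lt (v : List (List Bool)) (k : Nat) (row r' : List Bool)
    (hv : v[k]? = some row)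
    (h : r'.countP (fun b => !b) < row.countP (fun b => !b)) :
    falseCount (v.set k r') < falseCount v := by
  induction v generalizing k with
  | nil => simp at hv
  | cons a t ih =>
    cases k with
    | zero => simp_all [falseCount]
    | succ k =>
      simp only [List.getElem?_cons_succ] at hv
      have := ih k hv
      simp_all [falseCount]

lemma pyGet?_parts {α : Type} (xs : List α) (i : Int) (a : α)
    (h : PySem.List.pyGet? xs i = some a) :
    ∃ k, PySem.List.pyIdx? xs.length i = some k ∧ xs[k]? = some a := by
  simp only [PySem.List.pyGet?] at h
  cases hk : PySem.List.pyIdx? xs.length i with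
  | none => simp [hk] at h
  | some k => exact ⟨k, rfl, by simpa [hk] using h⟩

lemma pySet?_parts {α : Type} (xs : List α) (i : Int) (v : α) (r : List α)
    (h : PySem.List.pySet? xs i v = some r) :
    ∃ k, PySem.List.pyIdx? xs.length i = some k ∧ r = xs.set k v := by
  simp only [PySem.List.pySet?] at h
  cases hk : PySem.List.pyIdx? xs.length i with
  | none => simp [hk] at h
  | some k => exact ⟨k, rfl, by simp [hk] at h; exact h.symm⟩

lemma fc_cellSet_le (v : List (List Bool)) (i j : Int) :
    falseCount (cellSet v i j true) ≤ falseCount v := by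
  cases h1 : PySem.List.pyGet? v i with
  | none => simp [cellSet, h1]
  | some row =>
    cases h2 : PySem.List.pySet? row j true with
    | none => simp [cellSet, h1, h2]
    | some row' =>
      obtain ⟨ki, hki, hvki⟩ := pyGet?_parts v i row h1
      obtain ⟨kj, hkj, hrow'⟩ := pySet?_parts row j true row' h2
      subst hrow'
      simp only [cellSet, h1, Option.bind_some, h2, Option.elim_some]
      simp only [PySem.List.pySetD, PySem.List.pySet?, hki, Option.map_some, Option.getD_some]
      exact falseCount_set_le v ki row _ hvki (countP_set_true_le row kj)

lemma fc_cellSet_lt (v : List (List Bool)) (i j : Int) (h : cellGet v i j = some false) :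
    falseCount (cellSet v i j true) < falseCount v := by
  unfold cellGet at h
  cases h1 : PySem.List.pyGet? v i with
  | none => simp [h1] at h
  | some row =>
    simp only [h1, Option.bind_some] at h
    obtain ⟨kj, hkj, hrkj⟩ := pyGet?_parts row j false h
    obtain ⟨ki, hki, hvki⟩ := pyGet?_parts v i row h1
    simp only [cellSet, h1, Option.bind_some, PySem.List.pySet?, hkj, Option.map_some]
    simp only [Option.elim_some, PySem.List.pySetD, PySem.List.pySet?, hki, Option.map_some,
      Option.getD_some]
    exact falseCount_set_lt v ki row _ hvki (countP_set_true_lt row kj hrkj)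

lemma foldl_mu_le {α σ : Type} (μ : σ → Nat) (f : σ → α → σ)
    (h : ∀ s a, μ (f s a) ≤ μ s) (l : List α) (s : σ) : μ (l.foldl f s) ≤ μ s := by
  induction l generalizing s with
  | nil => exact le_rfl
  | cons a t ih => exact le_trans (ih (f s a)) (h s a)

-- A's knight-move table: zip of the dx and dy lists, as in the Python
def knightMovesA : List (Int × Int) :=
  List.zip [-2, -2, -1, 1, 2, 2, 1, -1] [-1, 1, 2, 2, 1, -1, -2, -2]

-- body of A's inner `for (loc1,loc2) in zip(dx,dy)` loop; state (fld, vsd, sum, appended nodes).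
-- Python's `not vsd[nx][ny]` raises where cellGet is none; here none blocks (outside Pre_bfs).
def stepA (n m x y depth : Int)
    (st : List (List String) × List (List Bool) × Int × List (Int × Int × Int))
    (mv : Int × Int) : List (List String) × List (List Bool) × Int × List (Int × Int × Int) :=
  if 0 ≤ x + mv.1 ∧ x + mv.1 < n ∧ 0 ≤ y + mv.2 ∧ y + mv.2 < m ∧
      cellGet st.2.1 (x + mv.1) (y + mv.2) = some false then
    if cellGet st.1 (x + mv.1) (y + mv.2) = some "#" then
      (cellSet st.1 (x + mv.1) (y + mv.2) "*", cellSet st.2.1 (x + mv.1) (y + mv.2) true,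
        st.2.2.1 + depth + 1, st.2.2.2 ++ [(x + mv.1, y + mv.2, depth + 1)])
    else
      (st.1, cellSet st.2.1 (x + mv.1) (y + mv.2) true, st.2.2.1,
        st.2.2.2 ++ [(x + mv.1, y + mv.2, depth + 1)])
  else st

lemma stepA_mu (n m x y depth : Int) (st) (mv : Int × Int) :
    muSt (stepA n m x y depth st mv) ≤ muSt st := by
  unfold stepA
  split_ifs with h1 h2 <;> simp only [muSt, List.length_append, List.length_cons,
    List.length_nil] <;> try exact Nat.le_refl _
  · have := fc_cellSet_lt st.2.1 (x + mv.1) (y + mv.2) h1.2.2.2.2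
    omega
  · have := fc_cellSet_lt st.2.1 (x + mv.1) (y + mv.2) h1.2.2.2.2
    omega

lemma foldA_mu (n m x y depth : Int) (ms : List (Int × Int)) (st) :
    muSt (ms.foldl (stepA n m x y depth) st) ≤ muSt st :=
  foldl_mu_le muSt _ (stepA_mu n m x y depth) ms st

-- A's BFS loop: pop the front node, re-mark it, expand the 8 moves, push the new nodes.
def loopA (n m : Int) :
    List (Int × Int × Int) → List (List String) → List (List Bool) → Int →
      List (List String) × List (List Bool) × Int
  | [], fld, vsd, s => (fld, vsd, s)
  | (x, y, depth) :: rest, fld, vsd, s =>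
    let vsd1 := cellSet vsd x y true
    let r := knightMovesA.foldl (stepA n m x y depth) (fld, vsd1, s, [])
    loopA n m (rest ++ r.2.2.2) r.1 r.2.1 r.2.2.1
termination_by q _ v _ => q.length + falseCount v
decreasing_by
  have h1 := foldA_mu n m x y depth knightMovesA (fld, cellSet vsd x y true, s, [])
  have h2 := fc_cellSet_le vsd x y
  simp only [muSt, List.length_nil, Nat.zero_add] at h1
  simp only [List.length_append, List.length_cons]
  omega

-- A's trailing `for rows in fld: if '#' in rows: return -1` scan
def finalScanA : List (List String) → Int → Int
  | [], s => s
  | row :: rest, s => if "#" ∈ row then -1 else finalScanA rest s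

def bfs (fld : List (List String)) (vsd : List (List Bool)) (start_x : Int) (start_y : Int) (n : Int) (m : Int) : Int :=
  let vsd1 := cellSet vsd (start_x - 1) (start_y - 1) true
  let r := loopA n m [(start_x - 1, start_y - 1, 0)] fld vsd1 0
  finalScanA (cellSet r.1 (start_x - 1) (start_y - 1) "*") r.2.2

-- ===== PORT B =====
-- B's knight-move table, written directly as pairs
def knightMovesB : List (Int × Int) :=
  [(-2, -1), (-2, 1), (-1, 2), (1, 2), (2, 1), (2, -1), (1, -2), (-1, -2)]

-- body of B's innermost `for ddx, ddy in moves` loop; state (fld, vsd, sum, next frontier).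
-- mark, then update sum/fld on '#', then append the cell unconditionally (Source B's shape).
def stepB (n m level x y : Int)
    (st : List (List String) × List (List Bool) × Int × List (Int × Int))
    (mv : Int × Int) : List (List String) × List (List Bool) × Int × List (Int × Int) :=
  if 0 ≤ x + mv.1 ∧ x + mv.1 < n ∧ 0 ≤ y + mv.2 ∧ y + mv.2 < m ∧
      cellGet st.2.1 (x + mv.1) (y + mv.2) = some false then
    ((if cellGet st.1 (x + mv.1) (y + mv.2) = some "#" then
        (cellSet st.1 (x + mv.1) (y + mv.2) "*", st.2.2.1 + level + 1)
      else (st.1, st.2.2.1)).1,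
     cellSet st.2.1 (x + mv.1) (y + mv.2) true,
     (if cellGet st.1 (x + mv.1) (y + mv.2) = some "#" then
        (cellSet st.1 (x + mv.1) (y + mv.2) "*", st.2.2.1 + level + 1)
      else (st.1, st.2.2.1)).2,
     st.2.2.2 ++ [(x + mv.1, y + mv.2)])
  else st

-- one frontier cell: B's `for ddx, ddy in moves` loop
def nodeB (n m level : Int)
    (st : List (List String) × List (List Bool) × Int × List (Int × Int))
    (p : Int × Int) : List (List String) × List (List Bool) × Int × List (Int × Int) :=
  knightMovesB.foldl (stepB n m level p.1 p.2) st

lemma stepB_mu (n m level x y : Int) (st) (mv : Int × Int) :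
    muSt (stepB n m level x y st mv) ≤ muSt st := by
  unfold stepB
  split_ifs with h1 h2
  · have := fc_cellSet_lt st.2.1 (x + mv.1) (y + mv.2) h1.2.2.2.2
    simp [muSt]; omega
  · have := fc_cellSet_lt st.2.1 (x + mv.1) (y + mv.2) h1.2.2.2.2
    simp [muSt]; omega
  · exact Nat.le_refl _

lemma nodeB_mu (n m level : Int) (st) (p : Int × Int) : muSt (nodeB n m level st p) ≤ muSt st :=
  foldl_mu_le muSt _ (stepB_mu n m level p.1 p.2) knightMovesB st

lemma foldFrontier_mu (n m level : Int) (fr : List (Int × Int)) (st) :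
    muSt (fr.foldl (nodeB n m level) st) ≤ muSt st :=
  foldl_mu_le muSt _ (nodeB_mu n m level) fr st

-- B's outer `while frontier:` loop: process a whole level, then move to the next frontier
def loopB (n m : Int) :
    List (Int × Int) → List (List String) → List (List Bool) → Int → Int →
      List (List String) × List (List Bool) × Int
  | [], fld, vsd, s, _ => (fld, vsd, s)
  | p :: fr, fld, vsd, s, level =>
    let r := (p :: fr).foldl (nodeB n m level) (fld, vsd, s, ([] : List (Int × Int)))
    loopB n m r.2.2.2 r.1 r.2.1 r.2.2.1 (level + 1)
termination_by fr _ v _ _ => fr.length + falseCount v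
decreasing_by
  have h1 := foldFrontier_mu n m level (p :: fr) (fld, vsd, s, ([] : List (Int × Int)))
  simp only [muSt, List.length_nil, Nat.zero_add] at h1
  simp only [List.length_cons]
  omega

def bfs_alt (fld : List (List String)) (vsd : List (List Bool)) (start_x : Int) (start_y : Int) (n : Int) (m : Int) : Int :=
  let vsd1 := cellSet vsd (start_x - 1) (start_y - 1) true
  let r := loopB n m [(start_x - 1, start_y - 1)] fld vsd1 0 0
  let fld2 := cellSet r.1 (start_x - 1) (start_y - 1) "*"
  if fld2.all (fun row => !(row.contains "#")) then r.2.2 else -1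

-- ===== PRECONDITION & SPEC =====
-- Pre_bfs keeps the inputs where the start indices land inside both arrays (Python-style, wrap
-- included) and either no knight move from the start stays inside the logical n×m board, or
-- fld/vsd fully cover the first n rows × m columns; outside that Python A raises IndexError on
-- every cell the BFS touches beyond the arrays (it still returns on rare excluded inputs whose
-- BFS happens to stop before the missing cells).
def Pre_bfs (fld : List (List String)) (vsd : List (List Bool)) (start_x : Int) (start_y : Int) (n : Int) (m : Int) : Prop :=
  cellGet vsd (start_x - 1) (start_y - 1) ≠ none ∧
  cellGet fld (start_x - 1) (start_y - 1) ≠ none ∧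
  ((∀ mv ∈ ([(-2, -1), (-2, 1), (-1, 2), (1, 2), (2, 1), (2, -1), (1, -2), (-1, -2)] : List (Int × Int)),
      ¬(0 ≤ start_x - 1 + mv.1 ∧ start_x - 1 + mv.1 < n ∧
        0 ≤ start_y - 1 + mv.2 ∧ start_y - 1 + mv.2 < m)) ∨
    (n ≤ (fld.length : Int) ∧ n ≤ (vsd.length : Int) ∧
     (∀ row ∈ fld.take n.toNat, m ≤ (row.length : Int)) ∧
     (∀ row ∈ vsd.take n.toNat, m ≤ (row.length : Int))))
instance (fld : List (List String)) (vsd : List (List Bool)) (start_x : Int) (start_y : Int) (n : Int) (m : Int) : Decidable (Pre_bfs fld vsd start_x start_y n m) := by unfold Pre_bfs; infer_instance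

def pvWitness_bfs : List (List String) × List (List Bool) × Int × Int × Int × Int :=
  ([["."]], [[false]], 1, 1, 1, 1)

def Spec_bfs (fld : List (List String)) (vsd : List (List Bool)) (start_x : Int) (start_y : Int) (n : Int) (m : Int) (out : Int) : Prop := out = bfs_alt fld vsd start_x start_y n m
instance (fld : List (List String)) (vsd : List (List Bool)) (start_x : Int) (start_y : Int) (n : Int) (m : Int) (out : Int) : Decidable (Spec_bfs fld vsd start_x start_y n m out) := by unfold Spec_bfs; infer_instance

-- ===== CLAIM (what is proved, stated in full; the proofs are below) =====
def Claim_equal_bfs : Prop := ∀ (fld : List (List String)) (vsd : List (List Bool)) (start_x : Int) (start_y : Int) (n : Int) (m : Int), Dom_bfs fld vsd start_x start_y n m → Pre_bfs fld vsd start_x start_y n m → Spec_bfs fld vsd start_x start_y n m (bfs fld vsd start_x start_y n m)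

-- ===== LEMMAS AND PROOFS =====

lemma pyIdx?_lt (len : Nat) (i : Int) (k : Nat) (h : PySem.List.pyIdx? len i = some k) :
    k < len := by
  unfold PySem.List.pyIdx? at h
  split_ifs at h with h1 h2 h3 <;> simp at h <;> omega

lemma cellSet_id_of_none {α : Type} (g : List (List α)) (i j : Int) (v : α)
    (h : cellGet g i j = none) : cellSet g i j v = g := by
  unfold cellGet at h
  cases h1 : PySem.List.pyGet? g i with
  | none => simp [cellSet, h1]
  | some row =>
    rw [h1, Option.bind_some] at h
    have h2 : PySem.List.pySet? row j v = none :=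
      (PySem.List.pySet?_eq_none_iff row j v).2 ((PySem.List.pyGet?_eq_none_iff row j).1 h)
    simp [cellSet, h1, h2]

lemma getElem?_some_parts {α : Type} (xs : List α) (k : Nat) (a : α)
    (h : xs[k]? = some a) : ∃ hk : k < xs.length, xs[k] = a := by
  rw [List.getElem?_eq_some_iff] at h
  exact h

lemma cellSet_id_of_same {α : Type} (g : List (List α)) (i j : Int) (a : α)
    (h : cellGet g i j = some a) : cellSet g i j a = g := by
  unfold cellGet at h
  cases h1 : PySem.List.pyGet? g i with
  | none => simp [h1] at h
  | some row =>
    rw [h1, Option.bind_some] at h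
    obtain ⟨kj, hkj, hrkj⟩ := pyGet?_parts row j a h
    obtain ⟨hlt, hval⟩ := getElem?_some_parts row kj a hrkj
    obtain ⟨ki, hki, hvki⟩ := pyGet?_parts g i row h1
    obtain ⟨hlti, hvali⟩ := getElem?_some_parts g ki row hvki
    have hset : row.set kj a = row := by
      rw [← hval]; exact List.set_getElem_self hlt
    have h2 : PySem.List.pySet? row j a = some row := by
      simp [PySem.List.pySet?, hkj, hset]
    have hcs : cellSet g i j a = g.set ki (row.set kj a) := by
      simp [cellSet, h1, PySem.List.pySet?, hkj, PySem.List.pySetD, hki]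
    rw [hcs, hset, ← hvali]
    exact List.set_getElem_self hlti

lemma cellGet_cellSet_same {α : Type} (g : List (List α)) (i j : Int) (a v : α)
    (h : cellGet g i j = some a) : cellGet (cellSet g i j v) i j = some v := by
  unfold cellGet at h
  cases h1 : PySem.List.pyGet? g i with
  | none => simp [h1] at h
  | some row =>
    rw [h1, Option.bind_some] at h
    obtain ⟨kj, hkj, hrkj⟩ := pyGet?_parts row j a h
    obtain ⟨hltj, _⟩ := getElem?_some_parts row kj a hrkj
    obtain ⟨ki, hki, hvki⟩ := pyGet?_parts g i row h1
    obtain ⟨hlti, _⟩ := getElem?_some_parts g ki row hvki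
    have hcs : cellSet g i j v = g.set ki (row.set kj v) := by
      simp [cellSet, h1, PySem.List.pySet?, hkj, PySem.List.pySetD, hki]
    rw [hcs]
    unfold cellGet
    have hgi : PySem.List.pyGet? (g.set ki (row.set kj v)) i = some (row.set kj v) := by
      simp [PySem.List.pyGet?, List.length_set, hki, List.getElem?_set_self hlti]
    rw [hgi, Option.bind_some]
    simp [PySem.List.pyGet?, List.length_set, hkj, List.getElem?_set_self hltj]

lemma cellGet_cellSet_or {α : Type} (g : List (List α)) (i j p q : Int) (v : α) :
    cellGet (cellSet g i j v) p q = cellGet g p q ∨ cellGet (cellSet g i j v) p q = some v := by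
  cases hbind : (PySem.List.pyGet? g i).bind (fun row => PySem.List.pySet? row j v) with
  | none =>
    left
    have : cellSet g i j v = g := by simp [cellSet, hbind]
    rw [this]
  | some row' =>
    rw [Option.bind_eq_some_iff] at hbind
    obtain ⟨row, h1, h2⟩ := hbind
    obtain ⟨ki, hki, hvki⟩ := pyGet?_parts g i row h1
    obtain ⟨hlti, _⟩ := getElem?_some_parts g ki row hvki
    obtain ⟨kj, hkj, hrow'⟩ := pySet?_parts row j v row' h2
    subst hrow'
    have hcs : cellSet g i j v = g.set ki (row.set kj v) := by
      simp [cellSet, h1, PySem.List.pySet?, hkj, PySem.List.pySetD, hki]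
    rw [hcs]
    unfold cellGet
    simp only [PySem.List.pyGet?, List.length_set]
    cases hkp : PySem.List.pyIdx? g.length p with
    | none => left; rfl
    | some kp =>
      simp only [Option.bind_some]
      by_cases hpi : kp = ki
      · rw [hpi, List.getElem?_set_self hlti, hvki]
        simp only [Option.bind_some, List.length_set]
        cases hkq : PySem.List.pyIdx? row.length q with
        | none => left; rfl
        | some kq =>
          simp only [Option.bind_some]
          by_cases hqj : kq = kj
          · right
            rw [hqj, List.getElem?_set_self (pyIdx?_lt row.length j kj hkj)]
          · left
            rw [List.getElem?_set_ne (Ne.symm hqj)]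
      · left
        rw [List.getElem?_set_ne (Ne.symm hpi)]

-- "this cell can never be enqueued again": not recorded unvisited
def NF (v : List (List Bool)) (p : Int × Int) : Prop := cellGet v p.1 p.2 ≠ some false

lemma NF_cellSet_true (v : List (List Bool)) (a b : Int) (p : Int × Int) (h : NF v p) :
    NF (cellSet v a b true) p := by
  unfold NF
  rcases cellGet_cellSet_or v a b p.1 p.2 true with h' | h'
  · rw [h']; exact h
  · rw [h']; simp

lemma NF_cellSet_self (v : List (List Bool)) (a b : Int) : NF (cellSet v a b true) (a, b) := by
  cases h : cellGet v a b with
  | none => simp [NF, cellSet_id_of_none v a b true h, h]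
  | some c => simp [NF, cellGet_cellSet_same v a b c true h]

lemma mark_id (v : List (List Bool)) (x y : Int) (h : NF v (x, y)) :
    cellSet v x y true = v := by
  cases hg : cellGet v x y with
  | none => exact cellSet_id_of_none v x y true hg
  | some c =>
    cases c with
    | false => exact absurd hg h
    | true => exact cellSet_id_of_same v x y true hg

lemma stepB_NF (n m level x y : Int) (st) (mv : Int × Int) (p : Int × Int)
    (h : NF st.2.1 p) : NF (stepB n m level x y st mv).2.1 p := by
  unfold stepB
  split_ifs with h1 h2
  · exact NF_cellSet_true _ _ _ _ h
  · exact NF_cellSet_true _ _ _ _ h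
  · exact h

lemma stepB_accNF (n m level x y : Int) (st) (mv : Int × Int)
    (h : ∀ p ∈ st.2.2.2, NF st.2.1 p) :
    ∀ p ∈ (stepB n m level x y st mv).2.2.2, NF (stepB n m level x y st mv).2.1 p := by
  unfold stepB
  split_ifs with h1 h2 <;> intro p hp
  · rcases List.mem_append.1 hp with hp | hp
    · exact NF_cellSet_true _ _ _ _ (h p hp)
    · rw [List.mem_singleton] at hp
      subst hp
      exact NF_cellSet_self st.2.1 (x + mv.1) (y + mv.2)
  · rcases List.mem_append.1 hp with hp | hp
    · exact NF_cellSet_true _ _ _ _ (h p hp)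
    · rw [List.mem_singleton] at hp
      subst hp
      exact NF_cellSet_self st.2.1 (x + mv.1) (y + mv.2)
  · exact h p hp

lemma foldB_NF (n m level x y : Int) (ms : List (Int × Int)) (st) (p : Int × Int)
    (h : NF st.2.1 p) : NF ((ms.foldl (stepB n m level x y) st)).2.1 p := by
  induction ms generalizing st with
  | nil => exact h
  | cons mv t ih => exact ih _ (stepB_NF n m level x y st mv p h)

lemma foldB_accNF (n m level x y : Int) (ms : List (Int × Int)) (st)
    (h : ∀ p ∈ st.2.2.2, NF st.2.1 p) :
    ∀ p ∈ (ms.foldl (stepB n m level x y) st).2.2.2, NF (ms.foldl (stepB n m level x y) st).2.1 p := by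
  induction ms generalizing st with
  | nil => exact h
  | cons mv t ih => exact ih _ (stepB_accNF n m level x y st mv h)

-- lift a B-state to an A-state by tagging the pending cells with their depth
def liftSt (st : List (List String) × List (List Bool) × Int × List (Int × Int)) (d : Int) :
    List (List String) × List (List Bool) × Int × List (Int × Int × Int) :=
  (st.1, st.2.1, st.2.2.1, st.2.2.2.map (fun p => (p.1, p.2, d)))

lemma knightMoves_eq : knightMovesA = knightMovesB := by decide

lemma stepAB (n m x y d : Int) (st) (mv : Int × Int) :
    stepA n m x y d (liftSt st (d + 1)) mv = liftSt (stepB n m d x y st mv) (d + 1) := by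
  unfold stepA stepB liftSt
  dsimp only
  split_ifs with h1 h2 <;> simp [List.map_append]

lemma foldl_lift {α σ τ : Type} (g : σ → τ) (fA : τ → α → τ) (fB : σ → α → σ)
    (h : ∀ s a, fA (g s) a = g (fB s a)) : ∀ (l : List α) (s : σ), l.foldl fA (g s) = g (l.foldl fB s) := by
  intro l
  induction l with
  | nil => intro s; rfl
  | cons a t ih => intro s; simp only [List.foldl_cons, h]; exact ih (fB s a)

lemma foldAB (n m x y d : Int) (st) :
    knightMovesA.foldl (stepA n m x y d) (liftSt st (d + 1))
      = liftSt (knightMovesB.foldl (stepB n m d x y) st) (d + 1) := by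
  rw [knightMoves_eq]
  exact foldl_lift (liftSt · (d + 1)) _ _ (fun s a => stepAB n m x y d s a) knightMovesB st

lemma stepB_acc (n m level x y : Int) (f : List (List String)) (v : List (List Bool)) (s : Int)
    (l : List (Int × Int)) (mv : Int × Int) :
    stepB n m level x y (f, v, s, l) mv
      = (let r := stepB n m level x y (f, v, s, []) mv; (r.1, r.2.1, r.2.2.1, l ++ r.2.2.2)) := by
  unfold stepB
  dsimp only
  split_ifs with h1 h2 <;> simp

lemma foldB_acc (n m level x y : Int) (ms : List (Int × Int)) (f : List (List String))
    (v : List (List Bool)) (s : Int) (l : List (Int × Int)) :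
    ms.foldl (stepB n m level x y) (f, v, s, l)
      = (let r := ms.foldl (stepB n m level x y) (f, v, s, []); (r.1, r.2.1, r.2.2.1, l ++ r.2.2.2)) := by
  induction ms generalizing f v s l with
  | nil => simp
  | cons mv t ih =>
    simp only [List.foldl_cons]
    rw [stepB_acc]
    rcases hr : stepB n m level x y (f, v, s, []) mv with ⟨f1, v1, s1, l1⟩
    dsimp only
    rw [ih f1 v1 s1 (l ++ l1), ih f1 v1 s1 l1]
    simp [List.append_assoc]

lemma finalScan_eq (l : List (List String)) (s : Int) :
    finalScanA l s = (if l.all (fun row => !(row.contains "#")) then s else -1) := by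
  induction l with
  | nil => simp [finalScanA]
  | cons row rest ih =>
    by_cases h : "#" ∈ row
    · simp [finalScanA, h, List.contains_iff_mem]
    · simp [finalScanA, h, ih, List.contains_iff_mem]

-- the heart: A's depth-tagged queue, split as current level ++ next level, runs exactly like
-- B's level-synchronous loop
lemma mainAB (n m : Int) : ∀ (K : Nat) (cur nxt : List (Int × Int)) (f : List (List String))
    (v : List (List Bool)) (s : Int) (d : Int),
    2 * falseCount v + cur.length + 2 * nxt.length < K →
    (∀ p ∈ cur, NF v p) → (∀ p ∈ nxt, NF v p) →
    loopA n m (cur.map (fun p => (p.1, p.2, d)) ++ nxt.map (fun p => (p.1, p.2, d + 1))) f v s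
      = (let r := cur.foldl (nodeB n m d) (f, v, s, nxt);
         loopB n m r.2.2.2 r.1 r.2.1 r.2.2.1 (d + 1)) := by
  intro K
  induction K with
  | zero => intro cur nxt f v s d h; exact absurd h (Nat.not_lt_zero _)
  | succ K ih =>
    intro cur nxt f v s d hK hcur hnxt
    cases cur with
    | nil =>
      cases nxt with
      | nil => simp [loopA, loopB]
      | cons p fr =>
        have hrec := ih (p :: fr) [] f v s (d + 1)
          (by simp only [List.length_cons, List.length_nil] at hK ⊢; omega) hnxt (by simp)
        simp only [List.map_nil, List.nil_append, List.append_nil, List.foldl_nil] at hrec ⊢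
        rw [hrec, loopB]
    | cons p cur' =>
      obtain ⟨x, y⟩ := p
      simp only [List.map_cons, List.cons_append, List.foldl_cons]
      rw [loopA]
      have hmark : cellSet v x y true = v := mark_id v x y (hcur (x, y) (by simp))
      rw [hmark]
      have hfold := foldAB n m x y d (f, v, s, ([] : List (Int × Int)))
      rw [show liftSt (f, v, s, ([] : List (Int × Int))) (d + 1)
            = (f, v, s, ([] : List (Int × Int × Int))) from rfl] at hfold
      rcases hB : knightMovesB.foldl (stepB n m d x y) (f, v, s, ([] : List (Int × Int)))
        with ⟨f1, v1, s1, app⟩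
      rw [hB] at hfold
      have hmu := foldl_mu_le muSt _ (stepB_mu n m d x y) knightMovesB
        (f, v, s, ([] : List (Int × Int)))
      rw [hB] at hmu
      simp only [muSt, List.length_nil, Nat.zero_add] at hmu
      have hcur' : ∀ q ∈ cur', NF v1 q := by
        intro q hq
        have := foldB_NF n m d x y knightMovesB (f, v, s, ([] : List (Int × Int))) q
          (hcur q (List.mem_cons_of_mem _ hq))
        rwa [hB] at this
      have hnxtapp : ∀ q ∈ nxt ++ app, NF v1 q := by
        intro q hq
        rcases List.mem_append.1 hq with hq | hq
        · have := foldB_NF n m d x y knightMovesB (f, v, s, ([] : List (Int × Int))) q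
            (hnxt q hq)
          rwa [hB] at this
        · have := foldB_accNF n m d x y knightMovesB (f, v, s, ([] : List (Int × Int)))
            (by intro r hr; simp at hr)
          rw [hB] at this
          exact this q hq
      have hmeas : 2 * falseCount v1 + cur'.length + 2 * (nxt ++ app).length < K := by
        simp only [List.length_append, List.length_cons] at hK ⊢
        omega
      have ihx := ih cur' (nxt ++ app) f1 v1 s1 d hmeas hcur' hnxtapp
      rw [hfold]
      dsimp only [liftSt]
      rw [List.append_assoc, ← List.map_append]
      rw [ihx]
      have hnode : nodeB n m d (f, v, s, nxt) (x, y) = (f1, v1, s1, nxt ++ app) := by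
        unfold nodeB
        rw [foldB_acc, hB]
      rw [hnode]

-- ===== VERDICT (by name: the statement is the Claim_ definition above) =====
theorem bfs_spec : Claim_equal_bfs := by
  intro fld vsd start_x start_y n m _ _
  unfold Spec_bfs bfs bfs_alt
  have hNF : NF (cellSet vsd (start_x - 1) (start_y - 1) true) (start_x - 1, start_y - 1) :=
    NF_cellSet_self vsd _ _
  have h := mainAB n m (2 * falseCount (cellSet vsd (start_x - 1) (start_y - 1) true) + 2)
    [(start_x - 1, start_y - 1)] [] fld (cellSet vsd (start_x - 1) (start_y - 1) true) 0 0
    (by simp only [List.length_cons, List.length_nil]; omega)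
    (by intro p hp; rw [List.mem_singleton] at hp; subst hp; exact hNF)
    (by intro p hp; simp at hp)
  simp only [List.map_cons, List.map_nil, List.append_nil, List.foldl_cons,
    List.foldl_nil] at h
  dsimp only
  rw [loopB]
  simp only [List.foldl_cons, List.foldl_nil]
  rw [h, finalScan_eq]
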